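-- pv_equiv track=rewrite | github.com/cake2000/CreatiCodeSkillMap | skillsv4/analyze_fix_g8.py | find_transitive_redundancy
-- ===== SOURCE A (Python) =====
-- from typing import Dict, List, Set, Tuple
--
-- def find_transitive_redundancy(skills: Dict[str, Dict], skill_id: str) -> List[str]:
--     """Find dependencies that are redundant due to transitive relations."""
--     if skill_id not in skills:
--         return []
--
--     direct_deps = {dep['id'] for dep in skills[skill_id]['dependencies']}
--     if len(direct_deps) <= 1:
--         return []
--
--     # For each dependency, find all its transitive dependencies
--     redundant = []
--     for dep_id in direct_deps:
--         if dep_id not in skills: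
--             continue
--
--         # Get all transitive deps from this dependency
--         transitive = set()
--         to_visit = [dep_id]
--         visited = set()
--
--         while to_visit:
--             current = to_visit.pop(0)
--             if current in visited or current not in skills:
--                 continue
--             visited.add(current)
--
--             for sub_dep in skills[current]['dependencies']:
--                 transitive.add(sub_dep['id'])
--                 to_visit.append(sub_dep['id'])
--
--         # Check if any other direct dependency is in transitive set
--         for other_dep in direct_deps:
--             if other_dep != dep_id and other_dep in transitive:
--                 redundant.append(other_dep)
--
--     return list(set(redundant))
-- ===== SOURCE B (Python) =====
-- def find_transitive_redundancy(skills, skill_id):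
--     """Find dependencies that are redundant due to transitive relations."""
--     if skill_id not in skills:
--         return []
--
--     direct_deps = {dep['id'] for dep in skills[skill_id]['dependencies']}
--     if len(direct_deps) <= 1:
--         return []
--
--     # Global reachability table reach[u] = ids reachable from u in >= 1 step,
--     # computed once by fixpoint iteration (ids absent from skills are leaves).
--     succ = {u: [d['id'] for d in info['dependencies']] for u, info in skills.items()}
--     reach = {u: set(vs) for u, vs in succ.items()}
--     while True:
--         new = {}
--         for u, vs in succ.items():
--             extra = set()
--             for v in vs:
--                 extra |= reach.get(v, set())
--             new[u] = reach[u] | extra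
--         if new == reach:
--             break
--         reach = new
--
--     redundant = []
--     for dep_id in direct_deps:
--         for other in direct_deps:
--             if other != dep_id and other in reach.get(dep_id, set()):
--                 redundant.append(other)
--     return list(set(redundant))
-- ===== Notes on version B (the rewrite author's own statement) =====
-- stated objective: alternative
-- what changed: A runs a separate BFS (FIFO queue + visited set) from every direct dependency to build per-source transitive closures; B computes one global reachability table for all skills at once by fixpoint (round) iteration and then only looks pairs of direct dependencies up in it.
-- outside the precondition, e.g. on find_transitive_redundancy({'a': {'dependencies': [{'id': 'a'}]}, 'z': {}}, 'a'): A returns [], B returns []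
import Mathlib
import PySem

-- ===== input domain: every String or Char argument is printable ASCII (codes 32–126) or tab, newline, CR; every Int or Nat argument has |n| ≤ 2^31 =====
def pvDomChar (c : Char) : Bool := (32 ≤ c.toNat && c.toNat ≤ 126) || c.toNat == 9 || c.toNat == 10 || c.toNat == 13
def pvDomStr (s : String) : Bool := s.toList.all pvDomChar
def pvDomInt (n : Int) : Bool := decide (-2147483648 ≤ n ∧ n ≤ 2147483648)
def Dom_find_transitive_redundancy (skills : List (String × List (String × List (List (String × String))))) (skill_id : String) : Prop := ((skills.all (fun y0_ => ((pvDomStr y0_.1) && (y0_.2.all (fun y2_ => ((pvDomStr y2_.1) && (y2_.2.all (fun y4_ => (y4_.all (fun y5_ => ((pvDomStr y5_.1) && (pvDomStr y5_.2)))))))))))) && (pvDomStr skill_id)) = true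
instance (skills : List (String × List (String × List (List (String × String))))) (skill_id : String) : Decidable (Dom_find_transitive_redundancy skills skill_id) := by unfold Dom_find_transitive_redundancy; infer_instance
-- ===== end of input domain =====

-- B replaces A's per-dependency BFS closures (queue + visited set) by one global
-- reachability table computed once by fixpoint iteration — objective: alternative
-- (same exact set of redundant ids, different algorithm; output order is proved equal).


-- ===== PORT A =====
-- shared by both ports: dep['id'] and info['dependencies'] (the same Python expressions occur in A and B)
def pvGetId (d : List (String × String)) : String := (PySem.Dict.mk d).getD "id" ""

def pvDeps (info : List (String × List (List (String × String)))) : List String :=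
  ((PySem.Dict.mk info).getD "dependencies" []).map pvGetId

-- termination-measure helpers for the BFS while-loop (cited by pvA_bfs's decreasing_by)
def pvDepTotal (sd : PySem.Dict String (List (String × List (List (String × String))))) : Nat :=
  (sd.items.map (fun p => (pvDeps p.2).length)).sum

def pvCountNotMem (l : List String) (s : PySem.Set String) : Nat :=
  (l.filter (fun k => !(PySem.Set.contains s k))).length

theorem pvFilter_length_lt {α : Type} (p q : α → Bool) (l : List α)
    (himp : ∀ x, q x = true → p x = true) (c : α) (hc : c ∈ l)
    (hpc : p c = true) (hqc : q c = false) :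
    (l.filter q).length < (l.filter p).length := by
  have hmono : ∀ (t : List α), (t.filter q).length ≤ (t.filter p).length := by
    intro t
    calc (t.filter q).length = ((t.filter q).filter p).length := by
          rw [List.filter_eq_self.2 (fun x hx => himp x (List.of_mem_filter hx))]
      _ ≤ (t.filter p).length := List.Sublist.length_le (List.Sublist.filter p (List.filter_sublist (l := t)))
  induction l with
  | nil => cases hc
  | cons a t ih =>
    rcases List.mem_cons.1 hc with h | h
    · subst h
      simp only [List.filter_cons, hpc, hqc, List.length_cons]
      exact Nat.lt_succ_of_le (hmono t)
    · by_cases hqa : q a = true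
      · have hpa := himp a hqa
        simp only [List.filter_cons, hqa, hpa, List.length_cons]
        exact Nat.succ_lt_succ (ih h)
      · rw [Bool.not_eq_true] at hqa
        simp only [List.filter_cons, hqa]
        by_cases hpa : p a = true
        · simp only [hpa, List.length_cons]
          exact Nat.lt_succ_of_lt (ih h)
        · rw [Bool.not_eq_true] at hpa
          simp only [hpa]
          exact ih h

theorem pvSubs_le_depTotal (sd : PySem.Dict String (List (String × List (List (String × String)))))
    (current : String) (h : sd.contains current = true) :
    (pvDeps (sd.getD current [])).length ≤ pvDepTotal sd := by
  have h1 : (sd.get? current).isSome := by rw [← PySem.Dict.contains_eq_isSome_get?, h]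
  rcases Option.isSome_iff_exists.1 h1 with ⟨v, hv⟩
  have hmem : (current, v) ∈ sd.items := PySem.Dict.mem_items_of_get?_eq_some sd hv
  have hg : sd.getD current [] = v := by
    rw [PySem.Dict.getD_eq_get?_getD, hv]; rfl
  rw [hg]
  have hm : (pvDeps v).length ∈ sd.items.map (fun p => (pvDeps p.2).length) :=
    List.mem_map_of_mem hmem
  exact List.le_sum_of_mem hm

theorem pvVisit_lt (sd : PySem.Dict String (List (String × List (List (String × String)))))
    (vis : PySem.Set String) (current : String)
    (h1 : PySem.Set.contains vis current = false) (h2 : sd.contains current = true) :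
    pvCountNotMem (sd.items.map Prod.fst) (PySem.Set.add vis current)
      < pvCountNotMem (sd.items.map Prod.fst) vis := by
  have hk : current ∈ sd.items.map Prod.fst := by
    have := (PySem.Dict.contains_iff_mem_keys sd current).1 h2
    simpa [PySem.Dict.keys] using this
  refine pvFilter_length_lt (fun k => !(PySem.Set.contains vis k))
    (fun k => !(PySem.Set.contains (PySem.Set.add vis current) k)) _ ?himp current hk ?hpc ?hqc
  case himp =>
    intro x hx
    simp only [Bool.not_eq_eq_eq_not, Bool.not_true] at hx ⊢
    by_contra hcon
    rw [Bool.not_eq_false, PySem.Set.contains_iff] at hcon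
    have hmm : x ∈ PySem.Set.add vis current := (PySem.Set.mem_add vis current x).2 (Or.inl hcon)
    rw [← PySem.Set.contains_iff] at hmm
    rw [hmm] at hx
    cases hx
  case hpc =>
    simp only [Bool.not_eq_eq_eq_not, Bool.not_false]
    exact h1
  case hqc =>
    simp only [Bool.not_eq_eq_eq_not, Bool.not_false]
    rw [PySem.Set.contains_iff, PySem.Set.mem_add]
    exact Or.inr rfl

-- the while-loop of A: to_visit / visited / transitive, queue popped from the front
def pvA_bfs (sd : PySem.Dict String (List (String × List (List (String × String)))))
    (to_visit : List String) (visited transitive : PySem.Set String) : PySem.Set String :=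
  match to_visit with
  | [] => transitive
  | current :: rest =>
    if PySem.Set.contains visited current || !(sd.contains current) then
      pvA_bfs sd rest visited transitive
    else
      let subs := pvDeps (sd.getD current [])
      pvA_bfs sd (rest ++ subs) (PySem.Set.add visited current) (PySem.Set.update transitive subs)
termination_by pvCountNotMem (sd.items.map Prod.fst) visited * (pvDepTotal sd + 1) + to_visit.length
decreasing_by
  · simp only [List.length_cons]; omega
  · rename_i hcond
    rw [Bool.or_eq_true, not_or] at hcond
    obtain ⟨hv, hd⟩ := hcond
    rw [Bool.not_eq_true] at hv
    have hd' : sd.contains current = true := by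
      simp only [Bool.not_eq_true', Bool.not_eq_true] at hd
      simpa using hd
    have hlt := pvVisit_lt sd visited current hv hd'
    have hle := pvSubs_le_depTotal sd current hd'
    simp only [List.length_append, List.length_cons]
    have h3 : pvCountNotMem (sd.items.map Prod.fst) (PySem.Set.add visited current) + 1
        ≤ pvCountNotMem (sd.items.map Prod.fst) visited := hlt
    nlinarith [hlt, hle]

def find_transitive_redundancy (skills : List (String × List (String × List (List (String × String))))) (skill_id : String) : List String :=
  let sd := PySem.Dict.mk skills
  if !(sd.contains skill_id) then []
  else
    let direct_deps : PySem.Set String := PySem.Set.ofList (pvDeps (sd.getD skill_id []))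
    if direct_deps.length ≤ 1 then []
    else
      let redundant : List String :=
        direct_deps.foldl (fun acc dep_id =>
          if !(sd.contains dep_id) then acc
          else
            let transitive := pvA_bfs sd [dep_id] PySem.Set.empty PySem.Set.empty
            direct_deps.foldl (fun acc2 other =>
              if other != dep_id && PySem.Set.contains transitive other then acc2 ++ [other]
              else acc2) acc) []
      PySem.Set.ofList redundant

-- ===== PORT B =====
-- succ = {u: [d['id'] for d in info['dependencies']] for u, info in skills.items()}
def pvB_succ (skills : List (String × List (String × List (List (String × String))))) :
    PySem.Dict String (List String) :=
  skills.foldl (fun d p => d.insert p.1 (pvDeps p.2)) PySem.Dict.empty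

-- one round: new = {u: reach[u] | (union of reach.get(v, set()) for v in vs) for u, vs in succ.items()}
def pvB_step (succ : PySem.Dict String (List String)) (reach : PySem.Dict String (List String)) :
    PySem.Dict String (List String) :=
  succ.items.foldl (fun r p =>
    r.insert p.1 (PySem.Set.union (reach.getD p.1 [])
      (p.2.foldl (fun e v => PySem.Set.update e (reach.getD v [])) PySem.Set.empty)))
    PySem.Dict.empty

-- the 'while True: … if new == reach: break' loop; the fuel argument only makes the
-- recursion structural (the proofs show the fixpoint is reached before it runs out)
def pvB_loop (succ : PySem.Dict String (List String)) (reach : PySem.Dict String (List String)) :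
    Nat → PySem.Dict String (List String)
  | 0 => reach
  | fuel + 1 =>
    let new := pvB_step succ reach
    if new = reach then reach else pvB_loop succ new fuel

def find_transitive_redundancy_alt (skills : List (String × List (String × List (List (String × String))))) (skill_id : String) : List String :=
  let sd := PySem.Dict.mk skills
  if !(sd.contains skill_id) then []
  else
    let direct_deps : PySem.Set String := PySem.Set.ofList (pvDeps (sd.getD skill_id []))
    if direct_deps.length ≤ 1 then []
    else
      let succ := pvB_succ skills
      let reach0 := succ.items.foldl (fun d p => d.insert p.1 (PySem.Set.ofList p.2)) PySem.Dict.empty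
      let fuel := succ.items.length * (PySem.Set.ofList succ.values.flatten).length + 1
      let reach := pvB_loop succ reach0 fuel
      let redundant : List String :=
        direct_deps.foldl (fun acc dep_id =>
          direct_deps.foldl (fun acc2 other =>
            if other != dep_id && PySem.Set.contains (reach.getD dep_id []) other then acc2 ++ [other]
            else acc2) acc) []
      PySem.Set.ofList redundant

-- ===== PRECONDITION & SPEC =====
-- Pre_ excludes (a) association lists with duplicate top-level keys, which a Python dict
-- cannot hold, and (b) inputs where skill_id is present but some skill dict lacks the
-- 'dependencies' key or some dependency dict lacks the 'id' key: on those A raises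
-- KeyError when its traversal reaches the malformed entry (slightly narrower: a
-- malformed entry A's traversal never reaches is excluded too, although A returns there).
def Pre_find_transitive_redundancy (skills : List (String × List (String × List (List (String × String))))) (skill_id : String) : Prop :=
  (skills.map Prod.fst).Nodup ∧
  (skill_id ∈ skills.map Prod.fst →
    ∀ p ∈ skills, (PySem.Dict.mk p.2).contains "dependencies" = true ∧
      ∀ d ∈ (PySem.Dict.mk p.2).getD "dependencies" [], (PySem.Dict.mk d).contains "id" = true)
instance (skills : List (String × List (String × List (List (String × String))))) (skill_id : String) : Decidable (Pre_find_transitive_redundancy skills skill_id) := by unfold Pre_find_transitive_redundancy; infer_instance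

def pvWitness_find_transitive_redundancy : (List (String × List (String × List (List (String × String))))) × String :=
  ([("a", [("dependencies", [[("id", "b")], [("id", "c")]])]),
    ("b", [("dependencies", [[("id", "c")]])]),
    ("c", [("dependencies", [])])], "a")

def Spec_find_transitive_redundancy (skills : List (String × List (String × List (List (String × String))))) (skill_id : String) (out : List String) : Prop := out = find_transitive_redundancy_alt skills skill_id
instance (skills : List (String × List (String × List (List (String × String))))) (skill_id : String) (out : List String) : Decidable (Spec_find_transitive_redundancy skills skill_id out) := by unfold Spec_find_transitive_redundancy; infer_instance

-- ===== CLAIM (what is proved, stated in full; the proofs are below) =====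
def Claim_equal_find_transitive_redundancy : Prop := ∀ (skills : List (String × List (String × List (List (String × String))))) (skill_id : String), Dom_find_transitive_redundancy skills skill_id → Pre_find_transitive_redundancy skills skill_id → Spec_find_transitive_redundancy skills skill_id (find_transitive_redundancy skills skill_id)

-- ===== LEMMAS AND PROOFS =====

-- abbreviations for the proofs: the dependency graph of `skills`
def pvS (sd : PySem.Dict String (List (String × List (List (String × String))))) (a : String) : List String :=
  pvDeps (sd.getD a [])

def pvEdge (sd : PySem.Dict String (List (String × List (List (String × String))))) (a b : String) : Prop :=
  b ∈ pvS sd a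

-- "x is reachable from a in at least one step"
def pvReach (sd : PySem.Dict String (List (String × List (List (String × String))))) (a x : String) : Prop :=
  ∃ u, Relation.ReflTransGen (pvEdge sd) a u ∧ x ∈ pvS sd u

theorem pvS_nil_of_not_contains (sd : PySem.Dict String (List (String × List (List (String × String)))))
    (a : String) (h : sd.contains a = false) : pvS sd a = [] := by
  unfold pvS
  rw [PySem.Dict.getD_of_not_contains sd _ h]
  rfl

theorem pvReach_false_of_nil (sd : PySem.Dict String (List (String × List (List (String × String)))))
    {t x : String} (h : pvS sd t = []) : ¬ pvReach sd t x := by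
  rintro ⟨u, rtg, hx⟩
  rcases Relation.ReflTransGen.cases_head rtg with rfl | ⟨c, hc, _⟩
  · rw [h] at hx; cases hx
  · unfold pvEdge at hc; rw [h] at hc; cases hc

-- the worklist invariant: every visited node has its successors recorded in `transitive`
-- and located in visited / the queue / outside the graph
theorem pvChain (sd : PySem.Dict String (List (String × List (List (String × String)))))
    (vis tr : PySem.Set String) (current : String) (rest : List String)
    (J : ∀ u ∈ vis, ∀ v ∈ pvS sd u, v ∈ tr ∧ (v ∈ vis ∨ v ∈ current :: rest ∨ sd.contains v = false))
    (hcur : current ∈ vis)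
    {t x : String} (ht : t ∈ vis) (hr : pvReach sd t x) :
    x ∈ tr ∨ ∃ t' ∈ rest, pvReach sd t' x := by
  obtain ⟨u, rtg, hx⟩ := hr
  suffices h : ∀ t, Relation.ReflTransGen (pvEdge sd) t u → t ∈ vis →
      (x ∈ tr ∨ ∃ t' ∈ rest, pvReach sd t' x) from h t rtg ht
  intro t rtg
  induction rtg using Relation.ReflTransGen.head_induction_on with
  | refl => intro hu; exact Or.inl ((J u hu x hx).1)
  | head hstep rtg ih =>
    rename_i a c
    intro ha
    rcases (J a ha c hstep).2 with hcv | hcl | hcf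
    · exact ih hcv
    · rcases List.mem_cons.1 hcl with rfl | hcrest
      · exact ih hcur
      · exact Or.inr ⟨c, hcrest, ⟨u, rtg, hx⟩⟩
    · exfalso
      have hS := pvS_nil_of_not_contains sd c hcf
      exact pvReach_false_of_nil sd hS ⟨u, rtg, hx⟩

-- membership characterization of A's BFS loop
theorem pvA_bfs_mem (sd : PySem.Dict String (List (String × List (List (String × String)))))
    (to_visit : List String) (visited transitive : PySem.Set String)
    (J : ∀ u ∈ visited, ∀ v ∈ pvS sd u,
      v ∈ transitive ∧ (v ∈ visited ∨ v ∈ to_visit ∨ sd.contains v = false))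
    (x : String) :
    x ∈ pvA_bfs sd to_visit visited transitive ↔
      x ∈ transitive ∨ ∃ t ∈ to_visit, pvReach sd t x := by
  match to_visit with
  | [] =>
    rw [pvA_bfs]
    simp
  | current :: rest =>
    rw [pvA_bfs]
    by_cases hc : (PySem.Set.contains visited current || !(sd.contains current)) = true
    · rw [if_pos hc]
      have J' : ∀ u ∈ visited, ∀ v ∈ pvS sd u,
          v ∈ transitive ∧ (v ∈ visited ∨ v ∈ rest ∨ sd.contains v = false) := by
        intro u hu v hv
        refine ⟨(J u hu v hv).1, ?_⟩
        rcases (J u hu v hv).2 with h1 | h2 | h3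
        · exact Or.inl h1
        · rcases List.mem_cons.1 h2 with rfl | hr
          · rw [Bool.or_eq_true] at hc
            rcases hc with hc | hc
            · exact Or.inl ((PySem.Set.contains_iff visited v).1 hc)
            · rw [Bool.not_eq_eq_eq_not, Bool.not_true] at hc
              exact Or.inr (Or.inr hc)
          · exact Or.inr (Or.inl hr)
        · exact Or.inr (Or.inr h3)
      rw [pvA_bfs_mem sd rest visited transitive J' x]
      constructor
      · rintro (h | ⟨t, htr, hr⟩)
        · exact Or.inl h
        · exact Or.inr ⟨t, List.mem_cons_of_mem _ htr, hr⟩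
      · rintro (h | ⟨t, htc, hr⟩)
        · exact Or.inl h
        · rcases List.mem_cons.1 htc with rfl | hr'
          · rw [Bool.or_eq_true] at hc
            rcases hc with hc | hc
            · exact pvChain sd visited transitive t rest J
                ((PySem.Set.contains_iff visited t).1 hc)
                ((PySem.Set.contains_iff visited t).1 hc) hr
            · rw [Bool.not_eq_eq_eq_not, Bool.not_true] at hc
              exact absurd hr (pvReach_false_of_nil sd (pvS_nil_of_not_contains sd t hc))
          · exact Or.inr ⟨t, hr', hr⟩
    · rw [if_neg hc]
      rw [Bool.or_eq_true, not_or] at hc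
      obtain ⟨hv, hd⟩ := hc
      rw [Bool.not_eq_true] at hv
      have hd' : sd.contains current = true := by
        simp only [Bool.not_eq_true', Bool.not_eq_true] at hd
        simpa using hd
      have hsubs : pvDeps (sd.getD current []) = pvS sd current := rfl
      have J' : ∀ u ∈ PySem.Set.add visited current, ∀ v ∈ pvS sd u,
          v ∈ PySem.Set.update transitive (pvDeps (sd.getD current [])) ∧
          (v ∈ PySem.Set.add visited current ∨ v ∈ rest ++ pvDeps (sd.getD current []) ∨
            sd.contains v = false) := by
        intro u hu v hvm
        rcases (PySem.Set.mem_add visited current u).1 hu with hu' | rfl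
        · refine ⟨(PySem.Set.mem_update transitive _ v).2 (Or.inl (J u hu' v hvm).1), ?_⟩
          rcases (J u hu' v hvm).2 with h1 | h2 | h3
          · exact Or.inl ((PySem.Set.mem_add visited current v).2 (Or.inl h1))
          · rcases List.mem_cons.1 h2 with rfl | hr
            · exact Or.inl ((PySem.Set.mem_add visited v v).2 (Or.inr rfl))
            · exact Or.inr (Or.inl (List.mem_append_left _ hr))
          · exact Or.inr (Or.inr h3)
        · rw [hsubs]
          exact ⟨(PySem.Set.mem_update transitive _ v).2 (Or.inr hvm),
            Or.inr (Or.inl (List.mem_append_right _ hvm))⟩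
      rw [pvA_bfs_mem sd (rest ++ pvDeps (sd.getD current [])) _ _ J' x]
      rw [hsubs]
      constructor
      · rintro (h | ⟨t, htm, hr⟩)
        · rcases (PySem.Set.mem_update transitive _ x).1 h with h' | h'
          · exact Or.inl h'
          · exact Or.inr ⟨current, List.mem_cons_self, ⟨current, Relation.ReflTransGen.refl, h'⟩⟩
        · rcases List.mem_append.1 htm with h' | h'
          · exact Or.inr ⟨t, List.mem_cons_of_mem _ h', hr⟩
          · obtain ⟨u, rtg, hx⟩ := hr
            exact Or.inr ⟨current, List.mem_cons_self,
              ⟨u, Relation.ReflTransGen.head (show pvEdge sd current t from h') rtg, hx⟩⟩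
      · rintro (h | ⟨t, htc, hr⟩)
        · exact Or.inl ((PySem.Set.mem_update transitive _ x).2 (Or.inl h))
        · rcases List.mem_cons.1 htc with rfl | hr'
          · obtain ⟨u, rtg, hx⟩ := hr
            rcases Relation.ReflTransGen.cases_head rtg with rfl | ⟨c, hstep, rtg'⟩
            · exact Or.inl ((PySem.Set.mem_update transitive _ x).2 (Or.inr hx))
            · exact Or.inr ⟨c, List.mem_append_right _ hstep, ⟨u, rtg', hx⟩⟩
          · exact Or.inr ⟨t, List.mem_append_left _ hr', hr⟩
termination_by pvCountNotMem (sd.items.map Prod.fst) visited * (pvDepTotal sd + 1) + to_visit.length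
decreasing_by
  · simp only [List.length_cons]; omega
  · have hv' : visited.contains current = false := by simpa using hv
    have hlt := pvVisit_lt sd visited current hv' hd'
    have hle := pvSubs_le_depTotal sd current hd'
    simp only [List.length_append, List.length_cons]
    nlinarith [hlt, hle]

-- A's per-source closure is exactly ≥1-step reachability
theorem pvA_bfs_spec (sd : PySem.Dict String (List (String × List (List (String × String)))))
    (dep x : String) :
    x ∈ pvA_bfs sd [dep] PySem.Set.empty PySem.Set.empty ↔ pvReach sd dep x := by
  rw [pvA_bfs_mem sd [dep] PySem.Set.empty PySem.Set.empty (by intro u hu; cases hu) x]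
  simp [PySem.Set.empty]


-- ---------- B-side: the fixpoint table ----------

def pvExtra (R : PySem.Dict String (List String)) (vs : List String) : PySem.Set String :=
  vs.foldl (fun e v => PySem.Set.update e (R.getD v [])) PySem.Set.empty

def pvU (skills : List (String × List (String × List (List (String × String))))) : PySem.Set String :=
  PySem.Set.ofList (pvB_succ skills).values.flatten

def pvPhi (R : PySem.Dict String (List String)) : Nat :=
  (R.items.map (fun q => q.2.length)).sum

def pvGood (skills : List (String × List (String × List (List (String × String)))))
    (R : PySem.Dict String (List String)) : Prop :=
  R.items.map Prod.fst = skills.map Prod.fst ∧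
  (∀ u, (R.getD u []).Nodup ∧ (∀ x ∈ R.getD u [], x ∈ pvU skills)) ∧
  (∀ u x, x ∈ R.getD u [] → pvReach (PySem.Dict.mk skills) u x) ∧
  (∀ u, u ∈ skills.map Prod.fst → ∀ v ∈ pvS (PySem.Dict.mk skills) u, v ∈ R.getD u [])

theorem pvMk_contains (skills : List (String × List (String × List (List (String × String)))))
    (u : String) :
    (PySem.Dict.mk skills).contains u = true ↔ u ∈ skills.map Prod.fst := by
  rw [PySem.Dict.contains_iff_mem_keys]
  rfl

theorem pvSucc_items (skills : List (String × List (String × List (List (String × String)))))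
    (hnd : (skills.map Prod.fst).Nodup) :
    (pvB_succ skills).items = skills.map (fun p => (p.1, pvDeps p.2)) := by
  unfold pvB_succ
  have := PySem.Dict.items_foldl_insert_fresh (l := skills) (k := Prod.fst)
    (v := fun p => pvDeps p.2) (d := PySem.Dict.empty)
    (by intro a _; rw [PySem.Dict.contains_empty]) hnd
  simpa using this

theorem pvSucc_getD (skills : List (String × List (String × List (List (String × String)))))
    (hnd : (skills.map Prod.fst).Nodup) (u : String) :
    (pvB_succ skills).getD u [] = pvS (PySem.Dict.mk skills) u := by
  by_cases hu : u ∈ skills.map Prod.fst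
  · obtain ⟨p, hp, hp1⟩ := List.mem_map.1 hu
    have hkeys : (pvB_succ skills).keys.Nodup := by
      show ((pvB_succ skills).items.map Prod.fst).Nodup
      rw [pvSucc_items skills hnd]
      simpa [List.map_map, Function.comp] using hnd
    have hmem : (u, pvDeps p.2) ∈ (pvB_succ skills).items := by
      rw [pvSucc_items skills hnd]
      exact List.mem_map.2 ⟨p, hp, by rw [hp1]⟩
    rw [PySem.Dict.getD_of_mem_items (pvB_succ skills) hmem hkeys]
    have hsd : (PySem.Dict.mk skills).getD u [] = p.2 := by
      apply PySem.Dict.getD_of_mem_items (PySem.Dict.mk skills) (k := u) (v := p.2)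
      · show (u, p.2) ∈ skills
        rw [← hp1]
        exact hp
      · exact hnd
    unfold pvS
    rw [hsd]
  · have h1 : (pvB_succ skills).contains u = false := by
      rw [← Bool.not_eq_true, PySem.Dict.contains_iff_mem_keys]
      show ¬ u ∈ (pvB_succ skills).items.map Prod.fst
      rw [pvSucc_items skills hnd]
      simpa [List.map_map, Function.comp] using hu
    have h2 : (PySem.Dict.mk skills).contains u = false := by
      rw [← Bool.not_eq_true, pvMk_contains]
      exact hu
    rw [PySem.Dict.getD_of_not_contains _ _ h1, pvS_nil_of_not_contains _ _ h2]

theorem pvStep_items (skills : List (String × List (String × List (List (String × String)))))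
    (hnd : (skills.map Prod.fst).Nodup) (R : PySem.Dict String (List String)) :
    (pvB_step (pvB_succ skills) R).items =
      (pvB_succ skills).items.map (fun p =>
        (p.1, PySem.Set.union (R.getD p.1 []) (pvExtra R p.2))) := by
  unfold pvB_step
  have hkeys : ((pvB_succ skills).items.map Prod.fst).Nodup := by
    rw [pvSucc_items skills hnd]
    simpa [List.map_map, Function.comp] using hnd
  have := PySem.Dict.items_foldl_insert_fresh (l := (pvB_succ skills).items) (k := Prod.fst)
    (v := fun p => PySem.Set.union (R.getD p.1 []) (pvExtra R p.2)) (d := PySem.Dict.empty)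
    (by intro a _; rw [PySem.Dict.contains_empty]) hkeys
  simpa [pvExtra] using this

theorem pvStep_keys (skills : List (String × List (String × List (List (String × String)))))
    (hnd : (skills.map Prod.fst).Nodup) (R : PySem.Dict String (List String)) :
    (pvB_step (pvB_succ skills) R).items.map Prod.fst = skills.map Prod.fst := by
  rw [pvStep_items skills hnd R, pvSucc_items skills hnd]
  simp [List.map_map, Function.comp]

theorem pvStep_getD (skills : List (String × List (String × List (List (String × String)))))
    (hnd : (skills.map Prod.fst).Nodup) (R : PySem.Dict String (List String)) (u : String)
    (hu : u ∈ skills.map Prod.fst) :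
    (pvB_step (pvB_succ skills) R).getD u [] =
      PySem.Set.union (R.getD u []) (pvExtra R (pvS (PySem.Dict.mk skills) u)) := by
  have hkeys : (pvB_step (pvB_succ skills) R).keys.Nodup := by
    show ((pvB_step (pvB_succ skills) R).items.map Prod.fst).Nodup
    rw [pvStep_keys skills hnd R]
    exact hnd
  apply PySem.Dict.getD_of_mem_items _ _ hkeys
  rw [pvStep_items skills hnd R]
  have hmem : (u, pvS (PySem.Dict.mk skills) u) ∈ (pvB_succ skills).items := by
    rw [← pvSucc_getD skills hnd u]
    obtain ⟨p, hp, hp1⟩ := List.mem_map.1 hu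
    have hkeys2 : (pvB_succ skills).keys.Nodup := by
      show ((pvB_succ skills).items.map Prod.fst).Nodup
      rw [pvSucc_items skills hnd]
      simpa [List.map_map, Function.comp] using hnd
    have hm2 : (u, pvDeps p.2) ∈ (pvB_succ skills).items := by
      rw [pvSucc_items skills hnd]
      exact List.mem_map.2 ⟨p, hp, by rw [hp1]⟩
    rw [PySem.Dict.getD_of_mem_items (pvB_succ skills) hm2 hkeys2]
    exact hm2
  exact List.mem_map.2 ⟨(u, pvS (PySem.Dict.mk skills) u), hmem, rfl⟩

theorem pvStep_getD_none (skills : List (String × List (String × List (List (String × String)))))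
    (hnd : (skills.map Prod.fst).Nodup) (R : PySem.Dict String (List String)) (u : String)
    (hu : u ∉ skills.map Prod.fst) :
    (pvB_step (pvB_succ skills) R).getD u [] = [] := by
  apply PySem.Dict.getD_of_not_contains
  rw [← Bool.not_eq_true, PySem.Dict.contains_iff_mem_keys]
  show ¬ u ∈ (pvB_step (pvB_succ skills) R).items.map Prod.fst
  rw [pvStep_keys skills hnd R]
  exact hu

theorem pvExtra_mem_aux (R : PySem.Dict String (List String)) (vs : List String)
    (e : PySem.Set String) (x : String) :
    x ∈ vs.foldl (fun e v => PySem.Set.update e (R.getD v [])) e ↔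
      x ∈ e ∨ ∃ v ∈ vs, x ∈ R.getD v [] := by
  induction vs generalizing e with
  | nil => simp
  | cons a t ih =>
    simp only [List.foldl_cons, ih, PySem.Set.mem_update]
    constructor
    · rintro ((h | h) | ⟨v, hv, hx⟩)
      · exact Or.inl h
      · exact Or.inr ⟨a, List.mem_cons_self, h⟩
      · exact Or.inr ⟨v, List.mem_cons_of_mem _ hv, hx⟩
    · rintro (h | ⟨v, hv, hx⟩)
      · exact Or.inl (Or.inl h)
      · rcases List.mem_cons.1 hv with rfl | hv'
        · exact Or.inl (Or.inr hx)
        · exact Or.inr ⟨v, hv', hx⟩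

theorem pvExtra_mem (R : PySem.Dict String (List String)) (vs : List String) (x : String) :
    x ∈ pvExtra R vs ↔ ∃ v ∈ vs, x ∈ R.getD v [] := by
  unfold pvExtra
  rw [pvExtra_mem_aux]
  simp [PySem.Set.empty]

theorem pvGood_step (skills : List (String × List (String × List (List (String × String)))))
    (hnd : (skills.map Prod.fst).Nodup) (R : PySem.Dict String (List String))
    (hg : pvGood skills R) : pvGood skills (pvB_step (pvB_succ skills) R) := by
  obtain ⟨hk, hnu, hsound, hseed⟩ := hg
  have hgd : ∀ u, u ∈ skills.map Prod.fst ∨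
      (pvB_step (pvB_succ skills) R).getD u [] = [] := by
    intro u
    by_cases hu : u ∈ skills.map Prod.fst
    · exact Or.inl hu
    · exact Or.inr (pvStep_getD_none skills hnd R u hu)
  refine ⟨pvStep_keys skills hnd R, ?_, ?_, ?_⟩
  · intro u
    rcases hgd u with hu | hu
    · rw [pvStep_getD skills hnd R u hu]
      constructor
      · exact PySem.Set.nodup_union _ _ (hnu u).1
      · intro x hx
        rcases (PySem.Set.mem_union _ _ x).1 hx with h | h
        · exact (hnu u).2 x h
        · obtain ⟨v, _, hv⟩ := (pvExtra_mem R _ x).1 h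
          exact (hnu v).2 x hv
    · rw [hu]; simp
  · intro u x hx
    rcases hgd u with hu | hu
    · rw [pvStep_getD skills hnd R u hu] at hx
      rcases (PySem.Set.mem_union _ _ x).1 hx with h | h
      · exact hsound u x h
      · obtain ⟨v, hv, hxv⟩ := (pvExtra_mem R _ x).1 h
        obtain ⟨w, rtg, hw⟩ := hsound v x hxv
        exact ⟨w, Relation.ReflTransGen.head (show pvEdge _ u v from hv) rtg, hw⟩
    · rw [hu] at hx; cases hx
  · intro u hu v hv
    rw [pvStep_getD skills hnd R u hu]
    exact (PySem.Set.mem_union _ _ v).2 (Or.inl (hseed u hu v hv))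

theorem pvGetD_eq_of_mem_items (R : PySem.Dict String (List String))
    (hkeys : R.keys.Nodup) {q : String × List String} (hq : q ∈ R.items) :
    R.getD q.1 [] = q.2 :=
  PySem.Dict.getD_of_mem_items R (by exact hq) hkeys []

theorem pvPhi_le (skills : List (String × List (String × List (List (String × String)))))
    (hnd : (skills.map Prod.fst).Nodup) (R : PySem.Dict String (List String))
    (hg : pvGood skills R) : pvPhi R ≤ skills.length * (pvU skills).length := by
  obtain ⟨hk, hnu, _, _⟩ := hg
  have hkeys : R.keys.Nodup := by
    show (R.items.map Prod.fst).Nodup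
    rw [hk]; exact hnd
  unfold pvPhi
  have hb : ∀ n ∈ R.items.map (fun q => q.2.length), n ≤ (pvU skills).length := by
    intro n hn
    obtain ⟨q, hq, rfl⟩ := List.mem_map.1 hn
    have hval : R.getD q.1 [] = q.2 := pvGetD_eq_of_mem_items R hkeys hq
    have h1 := (hnu q.1).1
    have h2 := (hnu q.1).2
    rw [hval] at h1 h2
    exact List.Subperm.length_le (List.subperm_of_subset h1 (fun x hx => h2 x hx))
  calc (R.items.map (fun q => q.2.length)).sum
      ≤ (R.items.map (fun q => q.2.length)).length • (pvU skills).length :=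
        List.sum_le_card_nsmul _ _ hb
    _ = R.items.length * (pvU skills).length := by simp [smul_eq_mul]
    _ = skills.length * (pvU skills).length := by
        have : R.items.length = skills.length := by
          have := congrArg List.length hk
          simpa using this
        rw [this]

theorem pvPhi_lt (skills : List (String × List (String × List (List (String × String)))))
    (hnd : (skills.map Prod.fst).Nodup) (R : PySem.Dict String (List String))
    (hg : pvGood skills R) (hne : pvB_step (pvB_succ skills) R ≠ R) :
    pvPhi R < pvPhi (pvB_step (pvB_succ skills) R) := by
  obtain ⟨hk, _, _, _⟩ := hg
  have hkeysR : R.keys.Nodup := by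
    show (R.items.map Prod.fst).Nodup
    rw [hk]; exact hnd
  have hkeysS : (pvB_step (pvB_succ skills) R).keys.Nodup := by
    show ((pvB_step (pvB_succ skills) R).items.map Prod.fst).Nodup
    rw [pvStep_keys skills hnd R]; exact hnd
  have hR : R.items = (skills.map Prod.fst).map (fun k => (k, R.getD k [])) := by
    have := PySem.Dict.items_eq_map_keys R hkeysR []
    rw [this]
    show ((R.items.map Prod.fst).map _) = _
    rw [hk]
  have hS : (pvB_step (pvB_succ skills) R).items =
      (skills.map Prod.fst).map (fun k => (k, (pvB_step (pvB_succ skills) R).getD k [])) := by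
    have := PySem.Dict.items_eq_map_keys (pvB_step (pvB_succ skills) R) hkeysS []
    rw [this]
    show (((pvB_step (pvB_succ skills) R).items.map Prod.fst).map _) = _
    rw [pvStep_keys skills hnd R]
  -- pointwise: the step only appends new elements
  have hpt : ∀ k ∈ skills.map Prod.fst, ∃ δ,
      (pvB_step (pvB_succ skills) R).getD k [] = R.getD k [] ++ δ := by
    intro k hkm
    rw [pvStep_getD skills hnd R k hkm]
    exact ⟨_, PySem.Set.update_eq_append_filter _ _⟩
  have hne2 : ∃ k ∈ skills.map Prod.fst,
      (pvB_step (pvB_succ skills) R).getD k [] ≠ R.getD k [] := by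
    by_contra hcon
    push Not at hcon
    apply hne
    rw [PySem.Dict.ext_iff, hS, hR]
    exact List.map_inj_left.2 (fun k hkm => by rw [hcon k hkm])
  unfold pvPhi
  rw [hR, hS]
  simp only [List.map_map]
  apply List.sum_lt_sum
  · intro p hp
    have hkm : p.1 ∈ skills.map Prod.fst := List.mem_map.2 ⟨p, hp, rfl⟩
    obtain ⟨δ, hδ⟩ := hpt p.1 hkm
    simp only [Function.comp_apply]
    rw [hδ]
    simp
  · obtain ⟨k, hkm, hne3⟩ := hne2
    obtain ⟨p, hp, hp1⟩ := List.mem_map.1 hkm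
    refine ⟨p, hp, ?_⟩
    obtain ⟨δ, hδ⟩ := hpt k hkm
    simp only [Function.comp_apply]
    rw [hp1, hδ]
    have hδne : δ ≠ [] := by
      intro h
      rw [h, List.append_nil] at hδ
      exact hne3 hδ
    have : 0 < δ.length := List.length_pos_iff.2 hδne
    simp only [List.length_append]
    omega

theorem pvLoop_fix (skills : List (String × List (String × List (List (String × String)))))
    (hnd : (skills.map Prod.fst).Nodup) :
    ∀ (fuel : Nat) (R : PySem.Dict String (List String)), pvGood skills R →
      skills.length * (pvU skills).length < fuel + pvPhi R →
      pvGood skills (pvB_loop (pvB_succ skills) R fuel) ∧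
        pvB_step (pvB_succ skills) (pvB_loop (pvB_succ skills) R fuel) =
          pvB_loop (pvB_succ skills) R fuel := by
  intro fuel
  induction fuel with
  | zero =>
    intro R hg hlt
    exact absurd hlt (by have := pvPhi_le skills hnd R hg; omega)
  | succ fuel ih =>
    intro R hg hlt
    rw [pvB_loop]
    by_cases hfix : pvB_step (pvB_succ skills) R = R
    · simp only [hfix]
      exact ⟨hg, hfix⟩
    · simp only [if_neg hfix]
      apply ih _ (pvGood_step skills hnd R hg)
      have := pvPhi_lt skills hnd R hg hfix
      omega

theorem pvR0_getD (skills : List (String × List (String × List (List (String × String)))))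
    (hnd : (skills.map Prod.fst).Nodup) (u : String) :
    ((pvB_succ skills).items.foldl (fun d p => d.insert p.1 (PySem.Set.ofList p.2))
        PySem.Dict.empty).getD u [] = PySem.Set.ofList (pvS (PySem.Dict.mk skills) u) := by
  have hkeys0 : ((pvB_succ skills).items.map Prod.fst).Nodup := by
    rw [pvSucc_items skills hnd]
    simpa [List.map_map, Function.comp] using hnd
  have hitems := PySem.Dict.items_foldl_insert_fresh (l := (pvB_succ skills).items)
    (k := Prod.fst) (v := fun p => PySem.Set.ofList p.2) (d := PySem.Dict.empty)
    (by intro a _; rw [PySem.Dict.contains_empty]) hkeys0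
  set R0 := (pvB_succ skills).items.foldl (fun d p => d.insert p.1 (PySem.Set.ofList p.2))
    PySem.Dict.empty with hR0
  have hit : R0.items = (pvB_succ skills).items.map (fun p => (p.1, PySem.Set.ofList p.2)) := by
    rw [hR0]
    simpa using hitems
  by_cases hu : u ∈ skills.map Prod.fst
  · have hkeys : R0.keys.Nodup := by
      show (R0.items.map Prod.fst).Nodup
      rw [hit]
      simpa [List.map_map, Function.comp] using hkeys0
    have hmem : (u, pvS (PySem.Dict.mk skills) u) ∈ (pvB_succ skills).items := by
      rw [← pvSucc_getD skills hnd u]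
      obtain ⟨p, hp, hp1⟩ := List.mem_map.1 hu
      have hkeys2 : (pvB_succ skills).keys.Nodup := hkeys0
      have hm2 : (u, pvDeps p.2) ∈ (pvB_succ skills).items := by
        rw [pvSucc_items skills hnd]
        exact List.mem_map.2 ⟨p, hp, by rw [hp1]⟩
      rw [PySem.Dict.getD_of_mem_items (pvB_succ skills) hm2 hkeys2]
      exact hm2
    apply PySem.Dict.getD_of_mem_items _ _ hkeys
    rw [hit]
    exact List.mem_map.2 ⟨(u, pvS (PySem.Dict.mk skills) u), hmem, rfl⟩
  · have h2 : (PySem.Dict.mk skills).contains u = false := by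
      rw [← Bool.not_eq_true, pvMk_contains]; exact hu
    rw [pvS_nil_of_not_contains _ _ h2]
    have h1 : R0.contains u = false := by
      rw [← Bool.not_eq_true, PySem.Dict.contains_iff_mem_keys]
      show ¬ u ∈ R0.items.map Prod.fst
      rw [hit, pvSucc_items skills hnd]
      simpa [List.map_map, Function.comp] using hu
    rw [PySem.Dict.getD_of_not_contains _ _ h1]
    rfl

theorem pvR0_good (skills : List (String × List (String × List (List (String × String)))))
    (hnd : (skills.map Prod.fst).Nodup) :
    pvGood skills ((pvB_succ skills).items.foldl (fun d p => d.insert p.1 (PySem.Set.ofList p.2))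
      PySem.Dict.empty) := by
  have hkeys0 : ((pvB_succ skills).items.map Prod.fst).Nodup := by
    rw [pvSucc_items skills hnd]
    simpa [List.map_map, Function.comp] using hnd
  have hitems := PySem.Dict.items_foldl_insert_fresh (l := (pvB_succ skills).items)
    (k := Prod.fst) (v := fun p => PySem.Set.ofList p.2) (d := PySem.Dict.empty)
    (by intro a _; rw [PySem.Dict.contains_empty]) hkeys0
  refine ⟨?_, ?_, ?_, ?_⟩
  · have : ((pvB_succ skills).items.foldl (fun d p => d.insert p.1 (PySem.Set.ofList p.2))
        PySem.Dict.empty).items = (pvB_succ skills).items.map (fun p => (p.1, PySem.Set.ofList p.2)) := by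
      simpa using hitems
    rw [this, pvSucc_items skills hnd]
    simp [List.map_map, Function.comp]
  · intro u
    rw [pvR0_getD skills hnd u]
    refine ⟨PySem.Set.nodup_ofList _, ?_⟩
    intro x hx
    rw [PySem.Set.mem_ofList] at hx
    -- x is a dependency id of u, hence occurs in succ.values.flatten
    by_cases hu : u ∈ skills.map Prod.fst
    · unfold pvU
      rw [PySem.Set.mem_ofList]
      rw [← pvSucc_getD skills hnd u] at hx
      obtain ⟨p, hp, hp1⟩ := List.mem_map.1 hu
      have hm2 : (u, pvDeps p.2) ∈ (pvB_succ skills).items := by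
        rw [pvSucc_items skills hnd]
        exact List.mem_map.2 ⟨p, hp, by rw [hp1]⟩
      rw [PySem.Dict.getD_of_mem_items (pvB_succ skills) hm2 hkeys0] at hx
      refine List.mem_flatten.2 ⟨pvDeps p.2, ?_, hx⟩
      show pvDeps p.2 ∈ (pvB_succ skills).items.map Prod.snd
      exact List.mem_map.2 ⟨(u, pvDeps p.2), hm2, rfl⟩
    · have h2 : (PySem.Dict.mk skills).contains u = false := by
        rw [← Bool.not_eq_true, pvMk_contains]; exact hu
      rw [pvS_nil_of_not_contains _ _ h2] at hx
      cases hx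
  · intro u x hx
    rw [pvR0_getD skills hnd u, PySem.Set.mem_ofList] at hx
    exact ⟨u, Relation.ReflTransGen.refl, hx⟩
  · intro u _ v hv
    rw [pvR0_getD skills hnd u, PySem.Set.mem_ofList]
    exact hv

-- the table B computes characterizes ≥1-step reachability
theorem pvRf_spec (skills : List (String × List (String × List (List (String × String)))))
    (hnd : (skills.map Prod.fst).Nodup) (u x : String) :
    x ∈ (pvB_loop (pvB_succ skills)
        ((pvB_succ skills).items.foldl (fun d p => d.insert p.1 (PySem.Set.ofList p.2))
          PySem.Dict.empty)
        ((pvB_succ skills).items.length *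
          (PySem.Set.ofList (pvB_succ skills).values.flatten).length + 1)).getD u [] ↔
      pvReach (PySem.Dict.mk skills) u x := by
  have hlen : (pvB_succ skills).items.length = skills.length := by
    rw [pvSucc_items skills hnd]; simp
  set R0 := (pvB_succ skills).items.foldl (fun d p => d.insert p.1 (PySem.Set.ofList p.2))
    PySem.Dict.empty with hR0
  set F := (pvB_succ skills).items.length *
    (PySem.Set.ofList (pvB_succ skills).values.flatten).length + 1 with hF
  have hFU : F = skills.length * (pvU skills).length + 1 := by
    rw [hF, hlen]; rfl
  have hfuel : skills.length * (pvU skills).length < F + pvPhi R0 := by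
    rw [hFU]; omega
  obtain ⟨hgood, hfix⟩ := pvLoop_fix skills hnd F R0 (pvR0_good skills hnd) hfuel
  set Rf := pvB_loop (pvB_succ skills) R0 F with hRfd
  obtain ⟨hk, hnu, hsound, hseed⟩ := hgood
  have hstab : ∀ w ∈ skills.map Prod.fst, ∀ v ∈ pvS (PySem.Dict.mk skills) w,
      ∀ y ∈ Rf.getD v [], y ∈ Rf.getD w [] := by
    intro w hw v hv y hy
    have h1 : y ∈ pvExtra Rf (pvS (PySem.Dict.mk skills) w) :=
      (pvExtra_mem Rf _ y).2 ⟨v, hv, hy⟩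
    have h2 : y ∈ (pvB_step (pvB_succ skills) Rf).getD w [] := by
      rw [pvStep_getD skills hnd Rf w hw]
      exact (PySem.Set.mem_union _ _ y).2 (Or.inr h1)
    rw [hfix] at h2
    exact h2
  constructor
  · exact hsound u x
  · rintro ⟨w, rtg, hx⟩
    clear hfuel
    induction rtg using Relation.ReflTransGen.head_induction_on with
    | refl =>
      have hw : w ∈ skills.map Prod.fst := by
        by_contra hcon
        have h2 : (PySem.Dict.mk skills).contains w = false := by
          rw [← Bool.not_eq_true, pvMk_contains]; exact hcon
        rw [pvS_nil_of_not_contains _ _ h2] at hx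
        cases hx
      exact hseed w hw x hx
    | head hstep rtg ih =>
      rename_i a c
      have ha : a ∈ skills.map Prod.fst := by
        by_contra hcon
        have h2 : (PySem.Dict.mk skills).contains a = false := by
          rw [← Bool.not_eq_true, pvMk_contains]; exact hcon
        have := pvS_nil_of_not_contains (PySem.Dict.mk skills) a h2
        unfold pvEdge at hstep
        rw [this] at hstep
        cases hstep
      exact hstab a ha c hstep x ih

-- ===== VERDICT (by name: the statement is the Claim_ definition above) =====
theorem pvRf_getD_nil (skills : List (String × List (String × List (List (String × String)))))
    (hnd : (skills.map Prod.fst).Nodup) (dep : String)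
    (hdep : (PySem.Dict.mk skills).contains dep = false) (other : String) :
    PySem.Set.contains ((pvB_loop (pvB_succ skills)
        ((pvB_succ skills).items.foldl (fun d p => d.insert p.1 (PySem.Set.ofList p.2))
          PySem.Dict.empty)
        ((pvB_succ skills).items.length *
          (PySem.Set.ofList (pvB_succ skills).values.flatten).length + 1)).getD dep []) other
      = false := by
  rw [← Bool.not_eq_true, PySem.Set.contains_iff]
  intro hmem
  have hr := (pvRf_spec skills hnd dep other).1 hmem
  exact pvReach_false_of_nil _ (pvS_nil_of_not_contains _ _ hdep) hr

theorem find_transitive_redundancy_spec : Claim_equal_find_transitive_redundancy := by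
  intro skills skill_id _hdom hpre
  obtain ⟨hnd, _hwf⟩ := hpre
  show find_transitive_redundancy skills skill_id = find_transitive_redundancy_alt skills skill_id
  unfold find_transitive_redundancy find_transitive_redundancy_alt
  simp only []
  split_ifs with h1 h2
  · rfl
  · rfl
  · apply congrArg
    apply PySem.List.foldl_congr_mem
    intro acc dep _
    by_cases hdep : (PySem.Dict.mk skills).contains dep = true
    · rw [if_neg (by rw [hdep]; simp)]
      apply PySem.List.foldl_congr_mem
      intro acc2 other _
      have hbool : PySem.Set.contains
          (pvA_bfs (PySem.Dict.mk skills) [dep] PySem.Set.empty PySem.Set.empty) other =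
          PySem.Set.contains ((pvB_loop (pvB_succ skills)
            ((pvB_succ skills).items.foldl (fun d p => d.insert p.1 (PySem.Set.ofList p.2))
              PySem.Dict.empty)
            ((pvB_succ skills).items.length *
              (PySem.Set.ofList (pvB_succ skills).values.flatten).length + 1)).getD dep [])
            other := by
        rw [Bool.eq_iff_iff, PySem.Set.contains_iff, PySem.Set.contains_iff]
        rw [pvA_bfs_spec, pvRf_spec skills hnd dep other]
      rw [hbool]
    · rw [if_pos (by rw [Bool.not_eq_true] at hdep; rw [hdep]; rfl)]
      rw [Bool.not_eq_true] at hdep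
      rw [PySem.List.foldl_congr_mem _ _ (fun a _ => a) acc
        (by intro acc2 other _
            rw [pvRf_getD_nil skills hnd dep hdep other]
            simp)]
      rw [PySem.List.foldl_ignore]
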